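-- pv_equiv track=rewrite | github.com/andrewmcloud/advent2024 | advent2024/day12.py | find_garden
-- ===== SOURCE A (Python) =====
-- def is_valid(entry, plant, visited, map) -> bool:
--     r, c = entry
--     return (0 <= r < len(map)
--             and 0 <= c < len(map[0])
--             and entry not in visited
--             and map[r][c] == plant
--             )
--
-- def find_garden(map):
--     gardens = []
--     visited = set()
--
--     def dfs(entry, plant, garden):
--         if not is_valid(entry, plant, visited, map):
--             return
--
--         garden.append(entry)
--         visited.add(entry)
--         r, c = entry
--         for rr, cc in [(1, 0), (0, 1), (-1, 0), (0, -1)]: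
--             dfs((r+rr, c+cc), plant, garden)
--         return garden
--
--     for r, row in enumerate(map):
--         for c, col in enumerate(row):
--             if (r, c) in visited:
--                 continue
--             garden = dfs((r, c), map[r][c], [])
--             gardens.append(garden)
--     return gardens
-- ===== SOURCE B (Python) =====
-- def find_garden(map):
--     gardens = []
--     visited = set()
--     for r, row in enumerate(map):
--         for c, _ in enumerate(row):
--             if (r, c) in visited:
--                 continue
--             plant = map[r][c]
--             garden = []
--             stack = [(r, c)]
--             while stack:
--                 er, ec = stack.pop()
--                 if not (0 <= er < len(map) and 0 <= ec < len(map[0])):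
--                     continue
--                 if (er, ec) in visited or map[er][ec] != plant:
--                     continue
--                 garden.append((er, ec))
--                 visited.add((er, ec))
--                 stack.extend([(er, ec - 1), (er - 1, ec), (er, ec + 1), (er + 1, ec)])
--             gardens.append(garden)
--     return gardens
-- ===== Notes on version B (the rewrite author's own statement) =====
-- stated objective: alternative
-- what changed: The nested recursive dfs (4-way recursion sharing a mutable visited set) is replaced by an iterative flood fill with an explicit stack, pushing neighbours in reverse so the pop order reproduces A's preorder; this also removes Python's recursion-depth limit on large regions.
-- outside the precondition, e.g. on find_garden([['a'], ['b', 'c']]): A returns [[(0, 0)], [(1, 0)], None], B returns [[(0, 0)], [(1, 0)], []]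
import Mathlib
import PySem

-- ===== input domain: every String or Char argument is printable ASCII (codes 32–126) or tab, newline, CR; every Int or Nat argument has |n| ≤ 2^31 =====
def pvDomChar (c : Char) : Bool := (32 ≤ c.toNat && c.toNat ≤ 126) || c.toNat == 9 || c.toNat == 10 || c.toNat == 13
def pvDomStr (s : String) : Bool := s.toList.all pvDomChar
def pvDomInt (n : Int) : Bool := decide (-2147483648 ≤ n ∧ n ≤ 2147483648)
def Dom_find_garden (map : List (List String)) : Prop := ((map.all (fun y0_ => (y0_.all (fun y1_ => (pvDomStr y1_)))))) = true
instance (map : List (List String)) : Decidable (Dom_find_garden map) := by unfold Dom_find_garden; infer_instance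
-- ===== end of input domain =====

-- B replaces A's nested recursive dfs by an iterative flood fill with an explicit stack
-- (same preorder, no recursion-depth limit); equivalence is about the return value only.

-- map[r][c] as an Option (none = IndexError); both Pythons index the grid this way.
def pvCell (mp : List (List String)) (r c : Int) : Option String :=
  (PySem.List.pyGet? mp r).bind (fun row => PySem.List.pyGet? row c)

-- shared bounds test: 0 <= r < len(map) and 0 <= c < len(map[0])
-- (len(map[0]) is (map.headD []).length: Python evaluates map[0] only when the grid has a cell)
def pvInB (mp : List (List String)) (e : Int × Int) : Bool :=
  decide (0 ≤ e.1) && decide (e.1 < (mp.length : Int)) &&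
  decide (0 ≤ e.2) && decide (e.2 < ((mp.headD []).length : Int))

-- ---- termination measure helpers (the ports' recursions cite them) ----
def pvAll (mp : List (List String)) : List (Int × Int) :=
  (PySem.List.pyRange 0 mp.length 1).flatMap
    (fun r => (PySem.List.pyRange 0 (mp.headD []).length 1).map (fun c => (r, c)))

def pvCount (mp : List (List String)) (v : PySem.Set (Int × Int)) : Nat :=
  (pvAll mp).countP (fun e => v.contains e)

theorem pvCount_le (mp : List (List String)) (v : PySem.Set (Int × Int)) :
    pvCount mp v ≤ (pvAll mp).length := List.countP_le_length

theorem pv_countP_lt {α : Type} {l : List α} {p q : α → Bool} {e : α}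
    (hmono : ∀ x, p x = true → q x = true) (hmem : e ∈ l)
    (hp : p e = false) (hq : q e = true) : l.countP p < l.countP q := by
  induction l with
  | nil => cases hmem
  | cons a t ih =>
    rcases List.mem_cons.mp hmem with h | h
    · subst h
      have hle : t.countP p ≤ t.countP q := List.countP_mono_left (fun x _ hx => hmono x hx)
      simp [hp, hq]; omega
    · have := ih h
      by_cases hpa : p a = true
      · simp [hpa, hmono a hpa]; omega
      · simp only [Bool.not_eq_true] at hpa
        by_cases hqa : q a = true <;> simp [hpa, hqa] <;> omega

theorem pv_mem_pvAll {mp : List (List String)} {e : Int × Int} (h : pvInB mp e = true) :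
    e ∈ pvAll mp := by
  obtain ⟨a, b⟩ := e
  simp only [pvInB, Bool.and_eq_true, decide_eq_true_eq] at h
  obtain ⟨⟨⟨h1, h2⟩, h3⟩, h4⟩ := h
  rw [pvAll]
  exact List.mem_flatMap.mpr ⟨a, PySem.List.mem_pyRange_one.mpr ⟨h1, h2⟩,
    List.mem_map.mpr ⟨b, PySem.List.mem_pyRange_one.mpr ⟨h3, h4⟩, rfl⟩⟩

theorem pvCount_lt {mp : List (List String)} {v : PySem.Set (Int × Int)} {e : Int × Int}
    (hb : pvInB mp e = true) (hc : v.contains e = false) :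
    pvCount mp v < pvCount mp (v.add e) := by
  refine pv_countP_lt (fun x hx => ?_) (pv_mem_pvAll hb) hc ?_
  · have : x ∈ v := (PySem.Set.contains_iff v x).mp hx
    exact (PySem.Set.contains_iff _ x).mpr ((PySem.Set.mem_add _ _ _).mpr (Or.inl this))
  · exact (PySem.Set.contains_iff _ e).mpr ((PySem.Set.mem_add _ _ _).mpr (Or.inr rfl))

-- Source B's two 'continue' tests versus A's is_valid: the same Boolean fact, used by both
-- flood's termination argument and the equivalence proof.
theorem pv_not_or {a b : Bool} (h : ¬ (a || !b) = true) : a = false ∧ b = true := by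
  cases a <;> cases b <;> simp_all

theorem pv_sub_lt {n a x : Nat} (hax : a < x) (hx : x ≤ n) : n - x < n - a := by omega

-- ===== PORT A =====
-- is_valid(entry, plant, visited, map)
def is_valid (entry : Int × Int) (plant : String) (visited : PySem.Set (Int × Int))
    (mp : List (List String)) : Bool :=
  pvInB mp entry && !(visited.contains entry) && (pvCell mp entry.1 entry.2 == some plant)

-- dfs: the shared mutable state (visited, garden) becomes a state pair threaded through the
-- four recursive calls; the extra fuel argument (called with #cells + 1, always sufficient,
-- see dfsA_stable) only makes the recursion structural — Python's dfs has no such bound.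
def dfsA (mp : List (List String)) (plant : String) :
    Nat → (Int × Int) → PySem.Set (Int × Int) × List (Int × Int) →
    PySem.Set (Int × Int) × List (Int × Int)
  | 0, _, st => st
  | n + 1, entry, st =>
    if is_valid entry plant st.1 mp = true then
      let st1 : PySem.Set (Int × Int) × List (Int × Int) := (st.1.add entry, st.2 ++ [entry])
      let s1 := dfsA mp plant n (entry.1 + 1, entry.2) st1
      let s2 := dfsA mp plant n (entry.1, entry.2 + 1) s1
      let s3 := dfsA mp plant n (entry.1 - 1, entry.2) s2
      dfsA mp plant n (entry.1, entry.2 - 1) s3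
    else st

def find_garden (map : List (List String)) : List (List (Int × Int)) :=
  -- gardens = [], visited = set(); for r, row in enumerate(map): for c, col in enumerate(row): …
  -- plant map[r][c] is pvCell (in range on every loop iteration); the garden returned by the
  -- top-level dfs is appended (always valid there under Pre_, so never Python's None).
  let fin := (PySem.List.enumerate map).foldl (fun acc rr =>
    (PySem.List.enumerate rr.2).foldl (fun acc cc =>
      if acc.1.contains (rr.1, cc.1) then acc
      else
        let res := dfsA map ((pvCell map rr.1 cc.1).getD "") ((pvAll map).length + 1) (rr.1, cc.1) (acc.1, [])
        (res.1, acc.2 ++ [res.2])) acc)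
    ((PySem.Set.empty : PySem.Set (Int × Int)), ([] : List (List (Int × Int))))
  fin.2

-- ===== PORT B =====
-- the while-stack loop of Source B: pop, skip out-of-bounds, skip visited/wrong plant,
-- else record the cell and push the four neighbours (pop order (1,0),(0,1),(-1,0),(0,-1)).
def flood (mp : List (List String)) (plant : String) :
    List (Int × Int) → PySem.Set (Int × Int) × List (Int × Int) →
    PySem.Set (Int × Int) × List (Int × Int)
  | [], st => st
  | e :: rest, st =>
    if hb : pvInB mp e = true then
      if hv : (st.1.contains e || !(pvCell mp e.1 e.2 == some plant)) = true then
        flood mp plant rest st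
      else
        flood mp plant
          ((e.1 + 1, e.2) :: (e.1, e.2 + 1) :: (e.1 - 1, e.2) :: (e.1, e.2 - 1) :: rest)
          (st.1.add e, st.2 ++ [e])
    else flood mp plant rest st
termination_by stack st => ((pvAll mp).length - pvCount mp st.1, stack.length)
decreasing_by
  · exact Prod.Lex.right _ (Nat.lt_succ_self _)
  · exact Prod.Lex.left _ _ (pv_sub_lt (pvCount_lt hb (pv_not_or hv).1) (pvCount_le mp (st.1.add e)))
  · exact Prod.Lex.right _ (Nat.lt_succ_self _)

def find_garden_alt (map : List (List String)) : List (List (Int × Int)) :=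
  let fin := (PySem.List.enumerate map).foldl (fun acc rr =>
    (PySem.List.enumerate rr.2).foldl (fun acc cc =>
      if acc.1.contains (rr.1, cc.1) then acc
      else
        let res := flood map ((pvCell map rr.1 cc.1).getD "") [(rr.1, cc.1)] (acc.1, [])
        (res.1, acc.2 ++ [res.2])) acc)
    ((PySem.Set.empty : PySem.Set (Int × Int)), ([] : List (List (Int × Int))))
  fin.2

-- ===== PRECONDITION & SPEC =====
-- Pre_ excludes non-rectangular grids: there Python A either raises IndexError (a row shorter
-- than row 0 reached by the fill) or appends None instead of a garden (a row longer than row 0),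
-- neither of which is a value of the declared return type.
def Pre_find_garden (map : List (List String)) : Prop :=
  ∀ row ∈ map, row.length = (map.headD []).length
instance (map : List (List String)) : Decidable (Pre_find_garden map) := by
  unfold Pre_find_garden; infer_instance

def pvWitness_find_garden : List (List String) := [["a", "b"], ["b", "b"]]

def Spec_find_garden (map : List (List String)) (out : List (List (Int × Int))) : Prop :=
  out = find_garden_alt map
instance (map : List (List String)) (out : List (List (Int × Int))) : Decidable (Spec_find_garden map out) := by unfold Spec_find_garden; infer_instance

-- ===== CLAIM (what is proved, stated in full; the proofs are below) =====
def Claim_equal_find_garden : Prop := ∀ (map : List (List String)), Dom_find_garden map → Pre_find_garden map → Spec_find_garden map (find_garden map)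

-- ===== LEMMAS AND PROOFS =====

theorem pv_or_not {a b : Bool} (h : (a || !b) = true) : ¬ (a = false ∧ b = true) := by
  cases a <;> cases b <;> simp_all

theorem pv_valid_facts {mp : List (List String)} {plant : String} {v : PySem.Set (Int × Int)}
    {e : Int × Int} (h : is_valid e plant v mp = true) :
    pvInB mp e = true ∧ v.contains e = false := by
  simp only [is_valid, Bool.and_eq_true, Bool.not_eq_true'] at h
  exact ⟨h.1.1, h.1.2⟩

theorem pv_valid_count_lt {mp : List (List String)} {plant : String} {v : PySem.Set (Int × Int)}
    {e : Int × Int} (h : is_valid e plant v mp = true) :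
    pvCount mp v < pvCount mp (v.add e) :=
  pvCount_lt (pv_valid_facts h).1 (pv_valid_facts h).2


-- visited only ever grows along a dfs call
theorem pvCount_le_add (mp : List (List String)) (v : PySem.Set (Int × Int)) (e : Int × Int) :
    pvCount mp v ≤ pvCount mp (v.add e) := by
  refine List.countP_mono_left (fun x _ hx => ?_)
  have : x ∈ v := (PySem.Set.contains_iff v x).mp hx
  exact (PySem.Set.contains_iff _ x).mpr ((PySem.Set.mem_add _ _ _).mpr (Or.inl this))

theorem dfsA_mono (mp : List (List String)) (plant : String) :
    ∀ (n : Nat) (e : Int × Int) (st : PySem.Set (Int × Int) × List (Int × Int)),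
      pvCount mp st.1 ≤ pvCount mp (dfsA mp plant n e st).1 := by
  intro n
  induction n with
  | zero => intro e st; exact le_refl _
  | succ k ih =>
    intro e st
    rw [dfsA]
    by_cases h : is_valid e plant st.1 mp = true
    · rw [if_pos h]
      exact le_trans (pvCount_le_add mp st.1 e)
        (le_trans (ih (e.1 + 1, e.2) (st.1.add e, st.2 ++ [e]))
          (le_trans (ih (e.1, e.2 + 1) (dfsA mp plant k (e.1 + 1, e.2) (st.1.add e, st.2 ++ [e])))
            (le_trans (ih (e.1 - 1, e.2) (dfsA mp plant k (e.1, e.2 + 1) (dfsA mp plant k (e.1 + 1, e.2) (st.1.add e, st.2 ++ [e]))))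
              (ih (e.1, e.2 - 1) (dfsA mp plant k (e.1 - 1, e.2) (dfsA mp plant k (e.1, e.2 + 1) (dfsA mp plant k (e.1 + 1, e.2) (st.1.add e, st.2 ++ [e]))))))))
    · rw [if_neg h]

-- the fuel does not matter once it exceeds the number of still-unvisited cells
theorem dfsA_stable (mp : List (List String)) (plant : String) :
    ∀ (n n' : Nat) (e : Int × Int) (st : PySem.Set (Int × Int) × List (Int × Int)),
      (pvAll mp).length - pvCount mp st.1 < n → (pvAll mp).length - pvCount mp st.1 < n' →
      dfsA mp plant n e st = dfsA mp plant n' e st := by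
  intro n
  induction n with
  | zero => intro n' e st h _; omega
  | succ k ih =>
    intro n' e st h h'
    cases n' with
    | zero => omega
    | succ k' =>
      rw [dfsA, dfsA]
      by_cases hv : is_valid e plant st.1 mp = true
      · rw [if_pos hv, if_pos hv]
        simp only []
        have hlt := pv_valid_count_lt hv
        have hle := pvCount_le mp (st.1.add e)
        have hp : pvCount mp ((st.1.add e, st.2 ++ [e]) : PySem.Set (Int × Int) × List (Int × Int)).1 = pvCount mp (st.1.add e) := rfl
        have e1 : dfsA mp plant k (e.1 + 1, e.2) (st.1.add e, st.2 ++ [e]) =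
            dfsA mp plant k' (e.1 + 1, e.2) (st.1.add e, st.2 ++ [e]) :=
          ih k' (e.1 + 1, e.2) (st.1.add e, st.2 ++ [e]) (by omega) (by omega)
        rw [e1]
        set A1 := dfsA mp plant k' (e.1 + 1, e.2) (st.1.add e, st.2 ++ [e]) with hA1
        have m0 : pvCount mp (st.1.add e) ≤ pvCount mp A1.1 :=
          dfsA_mono mp plant k' (e.1 + 1, e.2) (st.1.add e, st.2 ++ [e])
        have l0 : pvCount mp A1.1 ≤ (pvAll mp).length := pvCount_le mp A1.1
        have e2 : dfsA mp plant k (e.1, e.2 + 1) A1 = dfsA mp plant k' (e.1, e.2 + 1) A1 :=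
          ih k' (e.1, e.2 + 1) A1 (by omega) (by omega)
        rw [e2]
        set A2 := dfsA mp plant k' (e.1, e.2 + 1) A1 with hA2
        have m1 : pvCount mp (st.1.add e) ≤ pvCount mp A2.1 :=
          le_trans m0 (dfsA_mono mp plant k' (e.1, e.2 + 1) A1)
        have l1 : pvCount mp A2.1 ≤ (pvAll mp).length := pvCount_le mp A2.1
        have e3 : dfsA mp plant k (e.1 - 1, e.2) A2 = dfsA mp plant k' (e.1 - 1, e.2) A2 :=
          ih k' (e.1 - 1, e.2) A2 (by omega) (by omega)
        rw [e3]
        set A3 := dfsA mp plant k' (e.1 - 1, e.2) A2 with hA3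
        have m2 : pvCount mp (st.1.add e) ≤ pvCount mp A3.1 :=
          le_trans m1 (dfsA_mono mp plant k' (e.1 - 1, e.2) A2)
        have l2 : pvCount mp A3.1 ≤ (pvAll mp).length := pvCount_le mp A3.1
        exact ih k' (e.1, e.2 - 1) A3 (by omega) (by omega)
      · rw [if_neg hv, if_neg hv]

-- A's dfs on an invalid entry leaves the state unchanged.
theorem dfsA_invalid {mp : List (List String)} {plant : String} {e : Int × Int} {n : Nat}
    {st : PySem.Set (Int × Int) × List (Int × Int)}
    (h : ¬ is_valid e plant st.1 mp = true) : dfsA mp plant (n + 1) e st = st := by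
  rw [dfsA]; simp [h]

-- A's dfs on a valid entry with full fuel: record the cell, then recurse over the four
-- neighbours in order, each again with full fuel.
theorem dfsA_valid {mp : List (List String)} {plant : String} {e : Int × Int}
    {st : PySem.Set (Int × Int) × List (Int × Int)}
    (h : is_valid e plant st.1 mp = true) :
    dfsA mp plant ((pvAll mp).length + 1) e st =
      dfsA mp plant ((pvAll mp).length + 1) (e.1, e.2 - 1)
        (dfsA mp plant ((pvAll mp).length + 1) (e.1 - 1, e.2)
          (dfsA mp plant ((pvAll mp).length + 1) (e.1, e.2 + 1)
            (dfsA mp plant ((pvAll mp).length + 1) (e.1 + 1, e.2) (st.1.add e, st.2 ++ [e])))) := by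
  conv_lhs => rw [dfsA, if_pos h]
  simp only []
  have hlt := pv_valid_count_lt h
  have hle := pvCount_le mp (st.1.add e)
  have hp : pvCount mp ((st.1.add e, st.2 ++ [e]) : PySem.Set (Int × Int) × List (Int × Int)).1 = pvCount mp (st.1.add e) := rfl
  have f1 : dfsA mp plant ((pvAll mp).length) (e.1 + 1, e.2) (st.1.add e, st.2 ++ [e]) =
      dfsA mp plant ((pvAll mp).length + 1) (e.1 + 1, e.2) (st.1.add e, st.2 ++ [e]) :=
    dfsA_stable mp plant _ _ (e.1 + 1, e.2) (st.1.add e, st.2 ++ [e]) (by omega) (by omega)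
  rw [f1]
  set B1 := dfsA mp plant ((pvAll mp).length + 1) (e.1 + 1, e.2) (st.1.add e, st.2 ++ [e]) with hB1
  have m0 : pvCount mp (st.1.add e) ≤ pvCount mp B1.1 :=
    dfsA_mono mp plant ((pvAll mp).length + 1) (e.1 + 1, e.2) (st.1.add e, st.2 ++ [e])
  have l0 : pvCount mp B1.1 ≤ (pvAll mp).length := pvCount_le mp B1.1
  have f2 : dfsA mp plant ((pvAll mp).length) (e.1, e.2 + 1) B1 =
      dfsA mp plant ((pvAll mp).length + 1) (e.1, e.2 + 1) B1 :=
    dfsA_stable mp plant _ _ (e.1, e.2 + 1) B1 (by omega) (by omega)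
  rw [f2]
  set B2 := dfsA mp plant ((pvAll mp).length + 1) (e.1, e.2 + 1) B1 with hB2
  have m1 : pvCount mp (st.1.add e) ≤ pvCount mp B2.1 :=
    le_trans m0 (dfsA_mono mp plant ((pvAll mp).length + 1) (e.1, e.2 + 1) B1)
  have l1 : pvCount mp B2.1 ≤ (pvAll mp).length := pvCount_le mp B2.1
  have f3 : dfsA mp plant ((pvAll mp).length) (e.1 - 1, e.2) B2 =
      dfsA mp plant ((pvAll mp).length + 1) (e.1 - 1, e.2) B2 :=
    dfsA_stable mp plant _ _ (e.1 - 1, e.2) B2 (by omega) (by omega)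
  rw [f3]
  set B3 := dfsA mp plant ((pvAll mp).length + 1) (e.1 - 1, e.2) B2 with hB3
  have m2 : pvCount mp (st.1.add e) ≤ pvCount mp B3.1 :=
    le_trans m1 (dfsA_mono mp plant ((pvAll mp).length + 1) (e.1 - 1, e.2) B2)
  have l2 : pvCount mp B3.1 ≤ (pvAll mp).length := pvCount_le mp B3.1
  have f4 : dfsA mp plant ((pvAll mp).length) (e.1, e.2 - 1) B3 =
      dfsA mp plant ((pvAll mp).length + 1) (e.1, e.2 - 1) B3 :=
    dfsA_stable mp plant _ _ (e.1, e.2 - 1) B3 (by omega) (by omega)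
  rw [f4]

-- The stack loop of B computes the left fold of A's dfs (with full fuel) over the stack.
theorem flood_eq_foldl (mp : List (List String)) (plant : String) :
    ∀ (stack : List (Int × Int)) (st : PySem.Set (Int × Int) × List (Int × Int)),
      flood mp plant stack st =
        stack.foldl (fun s e => dfsA mp plant ((pvAll mp).length + 1) e s) st := by
  apply flood.induct mp plant
    (motive := fun stack st => flood mp plant stack st =
      stack.foldl (fun s e => dfsA mp plant ((pvAll mp).length + 1) e s) st)
  · intro st; rw [flood]; rfl
  · -- bounds ok, but visited or wrong plant: dfs is a no-op on e
    intro e rest st hb hv ih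
    have hinv : ¬ is_valid e plant st.1 mp = true := by
      simp only [is_valid, Bool.and_eq_true, Bool.not_eq_true']
      rintro ⟨⟨-, hc⟩, hp⟩
      exact pv_or_not hv ⟨hc, hp⟩
    rw [flood, dif_pos hb, dif_pos hv, ih, List.foldl_cons, dfsA_invalid hinv]
  · -- valid: one dfs call expands to the four pushed neighbours
    intro e rest st hb hv ih
    obtain ⟨h1, h2⟩ := pv_not_or hv
    have hval : is_valid e plant st.1 mp = true := by
      unfold is_valid; rw [hb, h1, h2]; rfl
    rw [flood, dif_pos hb, dif_neg hv, ih]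
    conv_rhs => rw [List.foldl_cons, dfsA_valid hval]
    simp only [List.foldl_cons]
  · -- out of bounds: dfs is a no-op on e
    intro e rest st hb ih
    have hinv : ¬ is_valid e plant st.1 mp = true := by
      simp only [is_valid, Bool.and_eq_true]
      rintro ⟨⟨hbi, -⟩, -⟩
      exact hb hbi
    rw [flood, dif_neg hb, ih, List.foldl_cons, dfsA_invalid hinv]

-- A one-element stack is exactly one dfs call.
theorem flood_singleton (mp : List (List String)) (plant : String) (e : Int × Int)
    (st : PySem.Set (Int × Int) × List (Int × Int)) :
    flood mp plant [e] st = dfsA mp plant ((pvAll mp).length + 1) e st := by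
  rw [flood_eq_foldl]; rfl

-- ===== VERDICT (by name: the statement is the Claim_ definition above) =====
theorem find_garden_spec : Claim_equal_find_garden := by
  intro map _ _
  unfold Spec_find_garden
  simp only [find_garden, find_garden_alt, flood_singleton]
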